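-- pv_equiv track=rewrite | github.com/Manelben6/ZFE | protocol.py | select_positions
-- ===== SOURCE A (Python) =====
-- def select_positions(LF, LV, F, V, KB):
--     # Combine LF and LV for complete priority mapping, defaulting to a low priority for undefined items
--     priorities = {**{k: 0 for k in F.union(V)}, **LF, **LV}
--
--     # Create a dictionary to track whether a position has been chosen
--     chosen_positions = {key: False for key in priorities.keys()}
--
--     # Combine F and V for iteration
--     positions = list(F.union(V))
--
--     # Sort positions by their priority (descending)
--     positions.sort(key=lambda x: priorities.get(x, 0), reverse=True)
--
--     # Convert KB into a dictionary where each position points to its arguments/conclusions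
--     arguments = {position: set() for position in positions}
--     for pred, concl in KB:
--         if concl in arguments:
--             arguments[concl].add(pred)
--
--     # Find the highest priority position(s) that can be concluded and not chosen yet
--     selected_positions = []
--     highest_priority = None
--
--     for position in positions:
--         # Check if the position can be concluded based on arguments and not already chosen
--         if arguments[position] and not chosen_positions[position]:
--             # Determine if this is the highest priority so far and collect all such positions
--             if highest_priority is None or priorities[position] == highest_priority:
--                 highest_priority = priorities[position]
--                 selected_positions.append(position)
--                 chosen_positions[position] = True
--             elif priorities[position] > highest_priority:
--                 # Reset the list if a higher priority position is found
--                 highest_priority = priorities[position]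
--                 selected_positions = [position]
--                 chosen_positions = {key: False for key in chosen_positions.keys()}
--                 chosen_positions[position] = True
--
--     return selected_positions
-- ===== SOURCE B (Python) =====
-- def select_positions(LF, LV, F, V, KB):
--     # One pass, no sort: track the running maximum priority among concludable
--     # positions and collect the positions attaining it.
--     pool = F.union(V)
--     concludable = {concl for _, concl in KB if concl in pool}
--     best = None
--     selected = []
--     for p in pool:
--         if p in concludable:
--             pr = LV[p] if p in LV else LF.get(p, 0)
--             if best is None or pr > best:
--                 best = pr
--                 selected = [p]
--             elif pr == best:
--                 selected.append(p)
--     return selected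
-- ===== Notes on version B (the rewrite author's own statement) =====
-- stated objective: faster
-- what changed: A merges three priority dicts, stable-sorts all positions by priority descending and scans the sorted list with a 'chosen' table to collect the leading group; B makes one unsorted pass over F|V, resolving each position's priority directly (LV over LF over 0) and keeping only the positions that attain the running maximum among concludable ones, so the sort disappears.
import Mathlib
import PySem

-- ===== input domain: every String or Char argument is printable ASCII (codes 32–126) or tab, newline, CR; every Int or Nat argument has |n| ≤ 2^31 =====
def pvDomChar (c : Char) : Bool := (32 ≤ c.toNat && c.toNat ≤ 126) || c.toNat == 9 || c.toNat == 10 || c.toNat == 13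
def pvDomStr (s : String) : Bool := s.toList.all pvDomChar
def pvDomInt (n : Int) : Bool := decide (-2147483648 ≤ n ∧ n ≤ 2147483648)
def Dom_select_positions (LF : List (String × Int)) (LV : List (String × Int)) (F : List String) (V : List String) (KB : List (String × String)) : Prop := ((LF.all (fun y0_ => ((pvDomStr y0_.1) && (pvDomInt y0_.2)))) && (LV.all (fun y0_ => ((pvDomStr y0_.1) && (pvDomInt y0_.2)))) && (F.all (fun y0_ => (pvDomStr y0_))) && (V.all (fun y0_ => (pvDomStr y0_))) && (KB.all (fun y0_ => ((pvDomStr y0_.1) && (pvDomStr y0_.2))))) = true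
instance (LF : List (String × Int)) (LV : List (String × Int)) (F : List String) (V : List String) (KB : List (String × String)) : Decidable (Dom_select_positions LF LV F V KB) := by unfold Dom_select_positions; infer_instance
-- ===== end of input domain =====

-- B replaces A's sort-then-scan (merge priority dicts, stable sort descending, scan for the
-- leading group with a "chosen" table) by a single unsorted pass that tracks the running
-- maximum priority among concludable positions.


-- ===== PORT A =====
def select_positions (LF : List (String × Int)) (LV : List (String × Int)) (F : List String) (V : List String) (KB : List (String × String)) : List String :=
  -- F.union(V)
  let fv : PySem.Set String := PySem.Set.union (PySem.Set.ofList F) V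
  -- priorities = {**{k: 0 for k in F.union(V)}, **LF, **LV}
  let priorities : PySem.Dict String Int :=
    LV.foldl (fun d q => d.insert q.1 q.2)
      (LF.foldl (fun d q => d.insert q.1 q.2)
        (fv.foldl (fun d k => d.insert k (0 : Int)) PySem.Dict.empty))
  -- chosen_positions = {key: False for key in priorities.keys()}
  let chosen0 : PySem.Dict String Bool :=
    priorities.keys.foldl (fun d k => d.insert k false) PySem.Dict.empty
  -- positions = list(F.union(V)); positions.sort(key=lambda x: priorities.get(x, 0), reverse=True)
  let positions : List String := PySem.List.sorted fv (fun x => priorities.getD x 0) true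
  -- arguments = {p: set() for p in positions}; for pred, concl in KB: if concl in arguments: arguments[concl].add(pred)
  let arguments : PySem.Dict String (PySem.Set String) :=
    KB.foldl (fun d q => if d.contains q.2 then d.modify q.2 PySem.Set.empty (fun s => PySem.Set.add s q.1) else d)
      (positions.foldl (fun d p => d.insert p PySem.Set.empty) PySem.Dict.empty)
  -- selection loop; state = (selected_positions, highest_priority, chosen_positions);
  -- the keyed accesses arguments[p], chosen_positions[p], priorities[p] are ported with getD:
  -- every p in positions is a key of all three dicts, so they never raise
  (positions.foldl (fun st position =>
      if !(arguments.getD position PySem.Set.empty).isEmpty && !(st.2.2.getD position false) then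
        match st.2.1 with
        | none =>
            (st.1 ++ [position], some (priorities.getD position 0), st.2.2.insert position true)
        | some h =>
            if priorities.getD position 0 == h then
              (st.1 ++ [position], some (priorities.getD position 0), st.2.2.insert position true)
            else if priorities.getD position 0 > h then
              ([position], some (priorities.getD position 0),
               (st.2.2.keys.foldl (fun d k => d.insert k false) PySem.Dict.empty).insert position true)
            else st
      else st)
    (([] : List String), (none : Option Int), chosen0)).1

-- ===== PORT B =====
def select_positions_alt (LF : List (String × Int)) (LV : List (String × Int)) (F : List String) (V : List String) (KB : List (String × String)) : List String :=
  let pool : PySem.Set String := PySem.Set.union (PySem.Set.ofList F) V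
  -- {concl for _, concl in KB if concl in pool}
  let concludable : PySem.Set String :=
    PySem.Set.ofList ((KB.filter (fun q => PySem.Set.contains pool q.2)).map (fun q => q.2))
  let dLF : PySem.Dict String Int := PySem.Dict.ofList LF
  let dLV : PySem.Dict String Int := PySem.Dict.ofList LV
  (pool.foldl (fun st p =>
      if PySem.Set.contains concludable p then
        let pr : Int := match dLV.get? p with | some v => v | none => dLF.getD p 0
        match st.1 with
        | none => (some pr, [p])
        | some b =>
            if pr > b then (some pr, [p])
            else if pr == b then (st.1, st.2 ++ [p])
            else st
      else st)
    ((none : Option Int), ([] : List String))).2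

-- ===== PRECONDITION & SPEC =====
-- LF and LV are Python dicts: an association list with a duplicated key does not arise from a
-- dict (both programs resolve a key through dict semantics, so a duplicate would be ambiguous).
def Pre_select_positions (LF : List (String × Int)) (LV : List (String × Int)) (F : List String) (V : List String) (KB : List (String × String)) : Prop :=
  (LF.map Prod.fst).Nodup ∧ (LV.map Prod.fst).Nodup
instance (LF : List (String × Int)) (LV : List (String × Int)) (F : List String) (V : List String) (KB : List (String × String)) : Decidable (Pre_select_positions LF LV F V KB) := by unfold Pre_select_positions; infer_instance

def pvWitness_select_positions : (List (String × Int)) × (List (String × Int)) × List String × List String × (List (String × String)) :=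
  ([("a", 1)], [("a", 2)], ["a"], ["b"], [("b", "a")])

def Spec_select_positions (LF : List (String × Int)) (LV : List (String × Int)) (F : List String) (V : List String) (KB : List (String × String)) (out : List String) : Prop := out = select_positions_alt LF LV F V KB
instance (LF : List (String × Int)) (LV : List (String × Int)) (F : List String) (V : List String) (KB : List (String × String)) (out : List String) : Decidable (Spec_select_positions LF LV F V KB out) := by unfold Spec_select_positions; infer_instance

-- ===== CLAIM (what is proved, stated in full; the proofs are below) =====
def Claim_equal_select_positions : Prop := ∀ (LF : List (String × Int)) (LV : List (String × Int)) (F : List String) (V : List String) (KB : List (String × String)), Dom_select_positions LF LV F V KB → Pre_select_positions LF LV F V KB → Spec_select_positions LF LV F V KB (select_positions LF LV F V KB)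

-- ===== LEMMAS AND PROOFS =====

theorem bool_eq_of_iff {a b : Bool} (h : a = true ↔ b = true) : a = b := by
  cases a <;> cases b <;> simp_all

-- lookup after folding an association list into a dict by overwriting inserts (nodup keys)
theorem get?_foldl_insert_pairs {ν : Type} (l : List (String × ν)) (d : PySem.Dict String ν)
    (hnd : (l.map Prod.fst).Nodup) (k : String) :
    (l.foldl (fun d q => d.insert q.1 q.2) d).get? k
      = match l.find? (fun q => q.1 == k) with
        | some q => some q.2
        | none => d.get? k := by
  induction l generalizing d with
  | nil => simp
  | cons a l ih =>
    rw [List.map_cons, List.nodup_cons] at hnd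
    rw [List.foldl_cons, ih _ hnd.2]
    by_cases h : a.1 = k
    · have hfl : l.find? (fun q => q.1 == k) = none := by
        apply List.find?_eq_none.mpr
        intro q hq hqk
        exact hnd.1 (h ▸ (beq_iff_eq.mp hqk) ▸ List.mem_map.mpr ⟨q, hq, rfl⟩)
      rw [hfl, List.find?_cons_of_pos (by simp [h]), PySem.Dict.get?_insert, if_pos h.symm]
    · rw [List.find?_cons_of_neg (by simp [h])]
      cases hfl : l.find? (fun q => q.1 == k) with
      | some q => simp
      | none => rw [PySem.Dict.get?_insert, if_neg (fun hh => h hh.symm)]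

-- a fold inserting the same constant value never changes a constant-default lookup
theorem getD_foldl_insert_const {ν : Type} (c : ν) (xs : List String) (d : PySem.Dict String ν)
    (p : String) (h : d.getD p c = c) :
    (xs.foldl (fun d k => d.insert k c) d).getD p c = c := by
  induction xs generalizing d with
  | nil => exact h
  | cons x xs ih =>
    rw [List.foldl_cons]
    apply ih
    rw [PySem.Dict.getD_insert]
    split
    · rfl
    · exact h

theorem mem_keys_foldl_insert_const {ν : Type} (c : ν) (xs : List String) (p : String) :
    (xs.foldl (fun d k => d.insert k c) PySem.Dict.empty).contains p = true ↔ p ∈ xs := by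
  rw [PySem.Dict.contains_iff_mem_keys,
      PySem.Dict.keys_foldl_insert (f := fun _ _ => c)]
  simp [PySem.Dict.keys_empty, PySem.Set.mem_update]

theorem set_add_ne_nil (s : PySem.Set String) (x : String) : PySem.Set.add s x ≠ [] := by
  cases s with
  | nil => simp [PySem.Set.add, PySem.Set.contains]
  | cons y ys =>
    unfold PySem.Set.add
    split <;> simp

-- nonemptiness of arguments[p] after the KB pass
theorem args_nonempty_iff (KB : List (String × String)) (p : String) :
    ∀ d : PySem.Dict String (PySem.Set String), d.contains p = true →
    (((KB.foldl (fun d q => if d.contains q.2 then d.modify q.2 PySem.Set.empty (fun s => PySem.Set.add s q.1) else d) d).getD p PySem.Set.empty ≠ []) ↔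
      (d.getD p PySem.Set.empty ≠ [] ∨ ∃ q ∈ KB, q.2 = p)) := by
  induction KB with
  | nil => intro d _; simp
  | cons q KB ih =>
    intro d hdp
    rw [List.foldl_cons]
    by_cases hq : d.contains q.2 = true
    · rw [if_pos hq]
      have hc' : (d.modify q.2 PySem.Set.empty (fun s => PySem.Set.add s q.1)).contains p = true := by
        rw [PySem.Dict.contains_modify, hdp, Bool.or_true]
      rw [ih _ hc']
      by_cases hpq : q.2 = p
      · constructor
        · intro _; right; exact ⟨q, by simp, hpq⟩
        · intro _
          left
          rw [PySem.Dict.getD_modify, if_pos hpq.symm]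
          exact set_add_ne_nil _ _
      · rw [PySem.Dict.getD_modify, if_neg (fun hh => hpq hh.symm)]
        constructor
        · rintro (h1 | ⟨q', hq', hq'2⟩)
          · exact Or.inl h1
          · exact Or.inr ⟨q', by simp [hq'], hq'2⟩
        · rintro (h1 | ⟨q', hq', hq'2⟩)
          · exact Or.inl h1
          · rcases List.mem_cons.mp hq' with h | h
            · exact absurd (h ▸ hq'2) hpq
            · exact Or.inr ⟨q', h, hq'2⟩
    · rw [if_neg hq, ih _ hdp]
      have hpq : q.2 ≠ p := fun hh => hq (hh ▸ hdp)
      constructor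
      · rintro (h1 | ⟨q', hq', hq'2⟩)
        · exact Or.inl h1
        · exact Or.inr ⟨q', by simp [hq'], hq'2⟩
      · rintro (h1 | ⟨q', hq', hq'2⟩)
        · exact Or.inl h1
        · rcases List.mem_cons.mp hq' with h | h
          · exact absurd (h ▸ hq'2) hpq
          · exact Or.inr ⟨q', h, hq'2⟩

theorem filter_insertBy_not {α : Type} (before : α → α → Bool) (P : α → Bool) (x : α)
    (ys : List α) (hx : P x = false) :
    (PySem.List.insertBy before x ys).filter P = ys.filter P := by
  induction ys with
  | nil => simp [PySem.List.insertBy, hx]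
  | cons y ys ih =>
    rw [PySem.List.insertBy]
    split
    · simp [List.filter_cons, hx]
    · rw [List.filter_cons, List.filter_cons, ih]

theorem filter_insertBy_max {α : Type} (k : α → Int) (P : α → Bool) (x : α) (ys : List α)
    (hx : P x = true) (hEq : ∀ y ∈ ys, P y = true → k y = k x)
    (hpw : ys.Pairwise (fun a b => k b ≤ k a)) :
    (PySem.List.insertBy (fun a b => decide (k b < k a)) x ys).filter P = ys.filter P ++ [x] := by
  induction ys with
  | nil => simp [PySem.List.insertBy, hx]
  | cons y ys ih =>
    rw [List.pairwise_cons] at hpw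
    rw [PySem.List.insertBy]
    split
    · rename_i hlt
      rw [decide_eq_true_iff] at hlt
      have hnil : (y :: ys).filter P = [] := by
        rw [List.filter_eq_nil_iff]
        intro z hz hPz
        have hzx : k z = k x := hEq z hz hPz
        have hzy : k z ≤ k y := by
          rcases List.mem_cons.mp hz with h | h
          · exact le_of_eq (congrArg k h)
          · exact hpw.1 z h
        omega
      rw [List.filter_cons, if_pos hx, hnil]
      rfl
    · rw [List.filter_cons, List.filter_cons,
          ih (fun z hz hPz => hEq z (by simp [hz]) hPz) hpw.2]
      split <;> rfl

theorem insertBy_pairwise {α : Type} (k : α → Int) (x : α) (ys : List α)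
    (hpw : ys.Pairwise (fun a b => k b ≤ k a)) :
    (PySem.List.insertBy (fun a b => decide (k b < k a)) x ys).Pairwise (fun a b => k b ≤ k a) := by
  induction ys with
  | nil => simp [PySem.List.insertBy]
  | cons y ys ih =>
    rw [List.pairwise_cons] at hpw
    rw [PySem.List.insertBy]
    split
    · rename_i hlt
      rw [decide_eq_true_iff] at hlt
      rw [List.pairwise_cons]
      constructor
      · intro z hz
        rcases List.mem_cons.mp hz with h | h
        · exact le_of_lt (by rw [h]; exact hlt)
        · exact le_trans (hpw.1 z h) (le_of_lt hlt)
      · exact List.pairwise_cons.mpr hpw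
    · rename_i hge
      rw [decide_eq_true_iff] at hge
      rw [List.pairwise_cons]
      constructor
      · intro z hz
        rcases (PySem.List.mem_insertBy _ _ _ _).mp hz with h | h
        · exact h ▸ not_lt.mp hge
        · exact hpw.1 z h
      · exact ih hpw.2

theorem filter_foldl_insertBy {α : Type} (k : α → Int) (P : α → Bool)
    (hP : ∀ y z, P y = true → P z = true → k y = k z) :
    ∀ (xs acc : List α), acc.Pairwise (fun a b => k b ≤ k a) →
    (xs.foldl (fun a x => PySem.List.insertBy (fun a b => decide (k b < k a)) x a) acc).filter P
      = acc.filter P ++ xs.filter P := by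
  intro xs
  induction xs with
  | nil => intro acc _; simp
  | cons x xs ih =>
    intro acc hacc
    rw [List.foldl_cons, ih _ (insertBy_pairwise k x acc hacc), List.filter_cons]
    by_cases hx : P x = true
    · rw [filter_insertBy_max k P x acc hx (fun y _ hy => hP y x hy hx) hacc, if_pos hx]
      simp
    · rw [filter_insertBy_not _ P x acc (by simpa using hx), if_neg hx]

-- a filter selecting elements of a single key class commutes with the stable reverse sort
theorem filter_sorted_rev {α : Type} (k : α → Int) (P : α → Bool) (xs : List α)
    (hP : ∀ y z, P y = true → P z = true → k y = k z) :
    (PySem.List.sorted xs k true).filter P = xs.filter P := by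
  rw [PySem.List.sorted_rev_eq_foldl_insertBy,
      filter_foldl_insertBy k P hP xs [] (by simp)]
  simp

-- B's priority resolution as a function (LV overrides LF overrides 0)
def prB (LF LV : List (String × Int)) (p : String) : Int :=
  match (PySem.Dict.ofList LV).get? p with
  | some v => v
  | none => (PySem.Dict.ofList LF).getD p 0

theorem prio_getD (LF LV : List (String × Int)) (fv : List String)
    (hLF : (LF.map Prod.fst).Nodup) (hLV : (LV.map Prod.fst).Nodup) (p : String) :
    (LV.foldl (fun d q => d.insert q.1 q.2)
      (LF.foldl (fun d q => d.insert q.1 q.2)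
        (fv.foldl (fun d k => d.insert k (0 : Int)) PySem.Dict.empty))).getD p 0
      = prB LF LV p := by
  have hR : prB LF LV p
      = (match LV.find? (fun q => q.1 == p) with
        | some q => q.2
        | none => (match LF.find? (fun q => q.1 == p) with
                   | some q => q.2
                   | none => 0)) := by
    unfold prB
    rw [show PySem.Dict.ofList LV = LV.foldl (fun d q => d.insert q.1 q.2) PySem.Dict.empty from rfl,
        get?_foldl_insert_pairs LV _ hLV p]
    cases LV.find? (fun q => q.1 == p) with
    | some q => rfl
    | none =>
      show (PySem.Dict.ofList LF).getD p 0 = _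
      rw [PySem.Dict.getD_eq_get?_getD,
          show PySem.Dict.ofList LF = LF.foldl (fun d q => d.insert q.1 q.2) PySem.Dict.empty from rfl,
          get?_foldl_insert_pairs LF _ hLF p]
      cases LF.find? (fun q => q.1 == p) with
      | some q => rfl
      | none => rfl
  rw [hR, PySem.Dict.getD_eq_get?_getD, get?_foldl_insert_pairs LV _ hLV p]
  cases LV.find? (fun q => q.1 == p) with
  | some q => rfl
  | none =>
    rw [get?_foldl_insert_pairs LF _ hLF p]
    cases LF.find? (fun q => q.1 == p) with
    | some q => rfl
    | none =>
      rw [← PySem.Dict.getD_eq_get?_getD]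
      exact getD_foldl_insert_const (0 : Int) fv PySem.Dict.empty p (by simp [PySem.Dict.getD_empty])

-- A's selection-loop body with the guard and the priority lookup abstracted
def stepA (cb : String → Bool) (prf : String → Int)
    (st : List String × Option Int × PySem.Dict String Bool) (position : String) :
    List String × Option Int × PySem.Dict String Bool :=
  if cb position && !(st.2.2.getD position false) then
    match st.2.1 with
    | none => (st.1 ++ [position], some (prf position), st.2.2.insert position true)
    | some h =>
        if prf position == h then
          (st.1 ++ [position], some (prf position), st.2.2.insert position true)
        else if prf position > h then
          ([position], some (prf position),
           (st.2.2.keys.foldl (fun d k => d.insert k false) PySem.Dict.empty).insert position true)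
        else st
  else st

-- B's loop body with the guard and the priority lookup abstracted
def stepB (cb : String → Bool) (prf : String → Int)
    (st : Option Int × List String) (p : String) : Option Int × List String :=
  if cb p then
    match st.1 with
    | none => (some (prf p), [p])
    | some b =>
        if prf p > b then (some (prf p), [p])
        else if prf p == b then (st.1, st.2 ++ [p])
        else st
  else st

-- the leading group of a priority-descending list, keyed by its first concludable element
def pickGroup (prf : String → Int) (cb : String → Bool) (r fl : List String) : List String :=
  match fl with
  | [] => []
  | x :: _ => r.filter (fun p => cb p && (prf p == prf x))

-- the group of a maximal element, keyed by the first maximum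
def pickMax (prf : String → Int) (cb : String → Bool) (r : List String) (o : Option String) : List String :=
  match o with
  | none => []
  | some m => r.filter (fun p => cb p && (prf p == prf m))

theorem Aloop_some (cb : String → Bool) (prf : String → Int) :
    ∀ (r sel : List String) (h : Int) (ch : PySem.Dict String Bool),
    r.Nodup → r.Pairwise (fun a b => prf b ≤ prf a) → (∀ x ∈ r, prf x ≤ h) →
    (∀ x ∈ r, ch.getD x false = false) →
    (r.foldl (stepA cb prf) (sel, some h, ch)).1
      = sel ++ r.filter (fun p => cb p && (prf p == h)) := by
  intro r
  induction r with
  | nil => intro sel h ch _ _ _ _; simp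
  | cons x r ih =>
    intro sel h ch hnd hpw hle hch
    rw [List.nodup_cons] at hnd
    rw [List.pairwise_cons] at hpw
    have hchx := hch x (by simp)
    rw [List.foldl_cons, List.filter_cons]
    by_cases hcb : cb x = true
    · by_cases heq : prf x = h
      · have hst : stepA cb prf (sel, some h, ch) x = (sel ++ [x], some h, ch.insert x true) := by
          simp [stepA, hcb, hchx, heq]
        rw [hst, ih (sel ++ [x]) h (ch.insert x true) hnd.2 hpw.2
            (fun y hy => hle y (by simp [hy]))
            (fun y hy => by
              rw [PySem.Dict.getD_insert, if_neg (fun hyx => hnd.1 (by rw [← hyx]; exact hy))]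
              exact hch y (by simp [hy]))]
        simp [hcb, heq]
      · have hlt : ¬ (prf x > h) := not_lt.mpr (hle x (by simp))
        have hst : stepA cb prf (sel, some h, ch) x = (sel, some h, ch) := by
          simp [stepA, hcb, hchx, heq, hlt]
        rw [hst, ih sel h ch hnd.2 hpw.2
            (fun y hy => hle y (by simp [hy]))
            (fun y hy => hch y (by simp [hy]))]
        simp [hcb, heq]
    · have hst : stepA cb prf (sel, some h, ch) x = (sel, some h, ch) := by
        simp [stepA, hcb]
      rw [hst, ih sel h ch hnd.2 hpw.2
          (fun y hy => hle y (by simp [hy]))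
          (fun y hy => hch y (by simp [hy]))]
      simp [hcb]

theorem Aloop_none (cb : String → Bool) (prf : String → Int) :
    ∀ (r : List String) (ch : PySem.Dict String Bool),
    r.Nodup → r.Pairwise (fun a b => prf b ≤ prf a) →
    (∀ x ∈ r, ch.getD x false = false) →
    (r.foldl (stepA cb prf) (([] : List String), (none : Option Int), ch)).1
      = pickGroup prf cb r (r.filter cb) := by
  intro r
  induction r with
  | nil => intro ch _ _ _; simp [pickGroup]
  | cons x r ih =>
    intro ch hnd hpw hch
    rw [List.nodup_cons] at hnd
    rw [List.pairwise_cons] at hpw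
    have hchx := hch x (by simp)
    rw [List.foldl_cons]
    by_cases hcb : cb x = true
    · have hst : stepA cb prf (([] : List String), (none : Option Int), ch) x
          = ([x], some (prf x), ch.insert x true) := by
        simp [stepA, hcb, hchx]
      rw [hst,
          Aloop_some cb prf r [x] (prf x) (ch.insert x true) hnd.2 hpw.2
            (fun y hy => hpw.1 y hy)
            (fun y hy => by
              rw [PySem.Dict.getD_insert, if_neg (fun hyx => hnd.1 (by rw [← hyx]; exact hy))]
              exact hch y (by simp [hy]))]
      rw [show (x :: r).filter cb = x :: r.filter cb from by simp [List.filter_cons, hcb]]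
      simp [pickGroup, hcb]
    · have hst : stepA cb prf (([] : List String), (none : Option Int), ch) x
          = (([] : List String), (none : Option Int), ch) := by
        simp [stepA, hcb]
      rw [hst, ih ch hnd.2 hpw.2 (fun y hy => hch y (by simp [hy]))]
      rw [show (x :: r).filter cb = r.filter cb from by simp [List.filter_cons, hcb]]
      cases hf : r.filter cb with
      | nil => simp [pickGroup]
      | cons z t => simp [pickGroup, hcb]

theorem max?_append_singleton {α : Type} (l : List α) (x : α) (key : α → Int) :
    PySem.List.max? (l ++ [x]) key
      = match PySem.List.max? l key with
        | none => some x
        | some m => if key m < key x then some x else some m := by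
  simp only [PySem.List.max?, List.foldl_append, List.foldl_cons, List.foldl_nil]
  cases List.foldl
      (fun acc x =>
        match acc with
        | none => some x
        | some m => if key m < key x then some x else some m)
      none l <;> rfl

theorem Bloop (cb : String → Bool) (prf : String → Int) :
    ∀ xs : List String,
    xs.foldl (stepB cb prf) ((none : Option Int), ([] : List String))
      = ((PySem.List.max? (xs.filter cb) prf).map prf,
         pickMax prf cb xs (PySem.List.max? (xs.filter cb) prf)) := by
  intro xs
  induction xs using List.reverseRecOn with
  | nil => simp [PySem.List.max?, pickMax]
  | append_singleton xs x ih =>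
    rw [List.foldl_append, List.foldl_cons, List.foldl_nil, ih]
    by_cases hcb : cb x = true
    · have hfil : (xs ++ [x]).filter cb = xs.filter cb ++ [x] := by
        simp [List.filter_append, List.filter_cons, hcb]
      rw [hfil, max?_append_singleton]
      cases hm : PySem.List.max? (xs.filter cb) prf with
      | none =>
        have hnil : xs.filter cb = [] := (PySem.List.max?_eq_none_iff _ _).mp hm
        have hfx : (xs ++ [x]).filter (fun p => cb p && (prf p == prf x)) = [x] := by
          rw [List.filter_append, List.filter_cons]
          have h0 : xs.filter (fun p => cb p && (prf p == prf x)) = [] := by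
            rw [List.filter_eq_nil_iff]
            intro z hz hPz
            simp only [Bool.and_eq_true] at hPz
            have hmem : z ∈ xs.filter cb := List.mem_filter.mpr ⟨hz, hPz.1⟩
            rw [hnil] at hmem
            simp at hmem
          simp [h0, hcb]
        simp [stepB, pickMax, hcb, hfx]
      | some m =>
        by_cases hlt : prf m < prf x
        · have hfx : (xs ++ [x]).filter (fun p => cb p && (prf p == prf x)) = [x] := by
            rw [List.filter_append, List.filter_cons]
            have h0 : xs.filter (fun p => cb p && (prf p == prf x)) = [] := by
              rw [List.filter_eq_nil_iff]
              intro z hz hPz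
              simp only [Bool.and_eq_true, beq_iff_eq] at hPz
              have hmem : z ∈ xs.filter cb := List.mem_filter.mpr ⟨hz, hPz.1⟩
              have hle := PySem.List.max?_isMax hm z hmem
              omega
            simp [h0, hcb]
          simp [stepB, pickMax, hcb, hlt, hfx]
        · by_cases heq : prf x = prf m
          · have hfx : (xs ++ [x]).filter (fun p => cb p && (prf p == prf m))
                = xs.filter (fun p => cb p && (prf p == prf m)) ++ [x] := by
              simp [List.filter_append, hcb, heq]
            simp [stepB, pickMax, hcb, heq, hfx]
          · have hfx : (xs ++ [x]).filter (fun p => cb p && (prf p == prf m))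
                = xs.filter (fun p => cb p && (prf p == prf m)) := by
              simp [List.filter_append, hcb, heq]
            have hgt : ¬ (prf x > prf m) := hlt
            simp [stepB, pickMax, hcb, hgt, heq, hfx]
    · have hfil : (xs ++ [x]).filter cb = xs.filter cb := by
        simp [List.filter_append, hcb]
      rw [hfil]
      cases hm : PySem.List.max? (xs.filter cb) prf with
      | none => simp [stepB, pickMax, hcb]
      | some m =>
        have hfx : (xs ++ [x]).filter (fun p => cb p && (prf p == prf m))
            = xs.filter (fun p => cb p && (prf p == prf m)) := by
          simp [List.filter_append, hcb]
        simp [stepB, pickMax, hcb, hfx]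

-- ===== VERDICT (by name: the statement is the Claim_ definition above) =====
set_option maxHeartbeats 1000000 in
theorem select_positions_spec : Claim_equal_select_positions := by
  intro LF LV F V KB _ hpre
  obtain ⟨hLF, hLV⟩ := hpre
  unfold Spec_select_positions
  simp only [select_positions, select_positions_alt]
  have hprio : ∀ p, (LV.foldl (fun d q => d.insert q.1 q.2)
      (LF.foldl (fun d q => d.insert q.1 q.2)
        ((PySem.Set.union (PySem.Set.ofList F) V).foldl (fun d k => d.insert k (0 : Int)) PySem.Dict.empty))).getD p 0
      = prB LF LV p := fun p => prio_getD LF LV _ hLF hLV p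
  simp only [hprio]
  -- names for the shared data (introduced as local definitions; occurrences need not abstract)
  set fv : List String := PySem.Set.union (PySem.Set.ofList F) V with hfv
  set prf : String → Int := prB LF LV with hprf
  set cb : String → Bool := fun p => KB.any (fun q => q.2 == p) with hcb
  set argsD : PySem.Dict String (PySem.Set String) :=
    KB.foldl (fun d q => if d.contains q.2 then d.modify q.2 PySem.Set.empty (fun s => PySem.Set.add s q.1) else d)
      ((PySem.List.sorted fv prf true).foldl (fun d k => d.insert k PySem.Set.empty) PySem.Dict.empty) with hargsD
  set cbA : String → Bool := fun p => !(argsD.getD p PySem.Set.empty).isEmpty with hcbA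
  set conclD : PySem.Set String :=
    PySem.Set.ofList ((KB.filter (fun q => PySem.Set.contains fv q.2)).map (fun q => q.2)) with hconcl
  set cbB : String → Bool := fun p => PySem.Set.contains conclD p with hcbB
  set chD : PySem.Dict String Bool :=
    (LV.foldl (fun d q => d.insert q.1 q.2)
      (LF.foldl (fun d q => d.insert q.1 q.2)
        (fv.foldl (fun d k => d.insert k (0 : Int)) PySem.Dict.empty))).keys.foldl
      (fun d k => d.insert k false) PySem.Dict.empty with hch
  -- structural facts
  have hfvnd : fv.Nodup := PySem.Set.nodup_union _ _ (PySem.Set.nodup_ofList F)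
  have hperm : (PySem.List.sorted fv prf true).Perm fv := PySem.List.sorted_perm fv prf true
  have hposnd : (PySem.List.sorted fv prf true).Nodup := (hperm.nodup_iff).mpr hfvnd
  have hpospw : (PySem.List.sorted fv prf true).Pairwise (fun a b => prf b ≤ prf a) :=
    PySem.List.sorted_pairwise_rev fv prf
  have hch0 : ∀ x ∈ (PySem.List.sorted fv prf true), chD.getD x false = false := by
    intro x _
    rw [hch]
    exact getD_foldl_insert_const false _ _ x (by simp [PySem.Dict.getD_empty])
  -- guard bridges
  have hguardA : ∀ p ∈ PySem.List.sorted fv prf true, cbA p = cb p := by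
    intro p hp
    have ha0c := (mem_keys_foldl_insert_const (PySem.Set.empty : PySem.Set String)
        (PySem.List.sorted fv prf true) p).mpr hp
    have h1 := args_nonempty_iff KB p _ ha0c
    rw [getD_foldl_insert_const (PySem.Set.empty : PySem.Set String)
        (PySem.List.sorted fv prf true) PySem.Dict.empty p
        (by simp [PySem.Dict.getD_empty])] at h1
    have h1' : argsD.getD p PySem.Set.empty ≠ [] ↔ ∃ q ∈ KB, q.2 = p := by
      rw [hargsD]
      simpa using h1
    apply bool_eq_of_iff
    constructor
    · intro hh
      have hne : argsD.getD p PySem.Set.empty ≠ [] := by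
        intro hnil
        rw [hcbA] at hh
        simp only [hnil] at hh
        simp at hh
      rcases h1'.mp hne with ⟨q, hq, hq2⟩
      rw [hcb]
      exact List.any_eq_true.mpr ⟨q, hq, beq_iff_eq.mpr hq2⟩
    · intro hh
      rw [hcb] at hh
      rcases List.any_eq_true.mp hh with ⟨q, hq, hq2⟩
      have hne := h1'.mpr ⟨q, hq, beq_iff_eq.mp hq2⟩
      rw [hcbA]
      simp only [Bool.not_eq_true']
      cases hE : (argsD.getD p PySem.Set.empty).isEmpty with
      | false => rfl
      | true => exact absurd (List.isEmpty_iff.mp hE) hne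
  have hguardB : ∀ p ∈ fv, cbB p = cb p := by
    intro p hp
    apply bool_eq_of_iff
    rw [hcbB, hcb, hconcl]
    rw [PySem.Set.contains_iff, PySem.Set.mem_ofList]
    constructor
    · intro hmem
      rcases List.mem_map.mp hmem with ⟨q, hq, hq2⟩
      exact List.any_eq_true.mpr ⟨q, (List.mem_filter.mp hq).1, beq_iff_eq.mpr hq2⟩
    · intro hh
      rcases List.any_eq_true.mp hh with ⟨q, hq, hq2⟩
      have hq2' := beq_iff_eq.mp hq2
      exact List.mem_map.mpr ⟨q, List.mem_filter.mpr
        ⟨hq, (PySem.Set.contains_iff fv q.2).mpr (by rw [hq2']; exact hp)⟩, hq2'⟩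
  -- the two loop results
  have hA := Aloop_none cbA prf (PySem.List.sorted fv prf true) chD hposnd hpospw hch0
  have hB := Bloop cbB prf fv
  have hBsnd := congrArg Prod.snd hB
  -- bridge: leading group of the sorted list = group of the maximum of the pool
  have hfA : (PySem.List.sorted fv prf true).filter cbA = (PySem.List.sorted fv prf true).filter cb :=
    List.filter_congr hguardA
  have hfB : fv.filter cbB = fv.filter cb := List.filter_congr hguardB
  have hbridge : pickGroup prf cbA (PySem.List.sorted fv prf true) ((PySem.List.sorted fv prf true).filter cbA)
      = pickMax prf cbB fv (PySem.List.max? (fv.filter cbB) prf) := by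
    rw [hfA, hfB]
    have hpermf : ((PySem.List.sorted fv prf true).filter cb).Perm (fv.filter cb) := hperm.filter cb
    cases hfil : (PySem.List.sorted fv prf true).filter cb with
    | nil =>
      have hnil : fv.filter cb = [] := by
        rw [hfil] at hpermf
        exact List.perm_nil.mp hpermf.symm
      rw [hnil, (PySem.List.max?_eq_none_iff _ _).mpr rfl]
      simp [pickGroup, pickMax]
    | cons x t =>
      have hxmem : x ∈ fv.filter cb := hpermf.mem_iff.mp (by rw [hfil]; exact List.mem_cons_self ..)
      cases hm : PySem.List.max? (fv.filter cb) prf with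
      | none =>
        rw [(PySem.List.max?_eq_none_iff _ _).mp hm] at hxmem
        simp at hxmem
      | some m =>
        have hmmem : m ∈ (PySem.List.sorted fv prf true).filter cb :=
          hpermf.mem_iff.mpr (PySem.List.max?_mem hm)
        have hfpw : ((PySem.List.sorted fv prf true).filter cb).Pairwise (fun a b => prf b ≤ prf a) :=
          hpospw.filter cb
        rw [hfil] at hmmem hfpw
        rw [List.pairwise_cons] at hfpw
        have h2 : prf m ≤ prf x := by
          rcases List.mem_cons.mp hmmem with h | h
          · exact le_of_eq (congrArg prf h)
          · exact hfpw.1 m h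
        have hval : prf m = prf x := le_antisymm h2 (PySem.List.max?_isMax hm x hxmem)
        have e1 : (PySem.List.sorted fv prf true).filter (fun p => cbA p && (prf p == prf x))
            = (PySem.List.sorted fv prf true).filter (fun p => cb p && (prf p == prf x)) :=
          List.filter_congr (fun p hp => by rw [hguardA p hp])
        have e2 : fv.filter (fun p => cbB p && (prf p == prf x))
            = fv.filter (fun p => cb p && (prf p == prf x)) :=
          List.filter_congr (fun p hp => by rw [hguardB p hp])
        have e3 : (PySem.List.sorted fv prf true).filter (fun p => cb p && (prf p == prf x))
            = fv.filter (fun p => cb p && (prf p == prf x)) := by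
          apply filter_sorted_rev prf _ fv
          intro y z hy hz
          simp only [Bool.and_eq_true, beq_iff_eq] at hy hz
          omega
        simp only [pickGroup, pickMax, hval, e1, e2, e3]
  exact hA.trans (hbridge.trans hBsnd.symm)
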